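-- pv_equiv track=rewrite | github.com/eorinhae/programmers | 프로그래머스/0/181932. 코드 처리하기/코드 처리하기.py | solution
-- ===== SOURCE A (Python) =====
-- def solution(code):
--     mode = 0
--     idx = 0
--     ret = ""
--     for i in code:
--         if i == '1': #code 문자가 1일 때 mode 바꾸기
--             if mode == 0:
--                 mode = 1
--             elif mode == 1:
--                 mode = 0
--         if mode == 0: #mode 값에 따라 ret 추가하기
--             if code[idx] != '1' and idx%2==0:
--                 ret += code[idx]
--         elif mode == 1:
--             if code[idx] != '1' and idx%2!=0:
--                 ret += code[idx]
--         idx += 1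
--     answer = ret
--     if ret == "":
--         answer = "EMPTY"
--     return answer
-- ===== SOURCE B (Python) =====
-- def solution(code):
--     # Two-pass: build inclusive prefix table of '1' counts, then filter by parity match.
--     counts = []
--     c = 0
--     for ch in code:
--         if ch == '1':
--             c += 1
--         counts.append(c)
--     kept = []
--     for i, (ch, cnt) in enumerate(zip(code, counts)):
--         if ch != '1' and i % 2 == cnt % 2:
--             kept.append(ch)
--     ans = "".join(kept)
--     return ans if ans else "EMPTY"
-- ===== Notes on version B (the rewrite author's own statement) =====
-- stated objective: alternative
-- what changed: Replaces A's single stateful loop (mode toggled in place, indexed lookups code[idx]) by a two-pass decomposition: first build an inclusive prefix table of cumulative '1' counts, then filter over enumerate(zip(code, counts)) keeping chars whose index parity equals the count parity, joining at the end.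
import Mathlib
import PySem

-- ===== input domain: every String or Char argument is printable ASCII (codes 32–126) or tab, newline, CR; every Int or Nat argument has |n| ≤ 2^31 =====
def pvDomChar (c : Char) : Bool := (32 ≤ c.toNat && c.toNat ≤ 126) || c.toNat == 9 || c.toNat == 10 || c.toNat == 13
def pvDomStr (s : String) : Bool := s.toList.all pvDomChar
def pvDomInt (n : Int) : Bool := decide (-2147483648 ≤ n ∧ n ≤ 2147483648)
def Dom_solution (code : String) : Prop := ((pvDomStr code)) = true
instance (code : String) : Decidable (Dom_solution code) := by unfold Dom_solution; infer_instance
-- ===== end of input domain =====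

-- B replaces A's one-pass mode-toggling loop by a two-pass shape (prefix table of
-- cumulative '1' counts, then a parity-matching filter over enumerate(zip(...)));
-- objective: alternative decomposition, same O(n) cost.

-- ===== PORT A =====
-- A's loop: for i in code, toggling mode and appending code[idx]; state (mode, idx, ret).
-- code[idx] is ported with PySem.Str.pyGet?; its none branch (IndexError) is unreachable
-- since idx always stays below len(code), so the state is left unchanged there.
def solutionLoop (code : String) : List Char → Int × Int × List Char → Int × Int × List Char
  | [], st => st
  | i :: rest, (mode, idx, ret) =>
    let mode := if i = '1' then (if mode = 0 then 1 else if mode = 1 then 0 else mode) else mode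
    let ret :=
      if mode = 0 then
        match PySem.Str.pyGet? code idx with
        | some c => if c ≠ '1' ∧ PySem.Int.mod idx 2 = 0 then ret ++ [c] else ret
        | none => ret  -- unreachable (IndexError cannot happen: idx < len code)
      else if mode = 1 then
        match PySem.Str.pyGet? code idx with
        | some c => if c ≠ '1' ∧ PySem.Int.mod idx 2 ≠ 0 then ret ++ [c] else ret
        | none => ret  -- unreachable
      else ret
    solutionLoop code rest (mode, idx + 1, ret)

def solution (code : String) : String :=
  if (solutionLoop code code.toList (0, 0, [])).2.2 = [] then "EMPTY"
  else String.ofList (solutionLoop code code.toList (0, 0, [])).2.2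

-- ===== PORT B =====
-- first pass: inclusive running count of '1' characters
def countsLoop : List Char → Int → List Int
  | [], _ => []
  | ch :: rest, c =>
    let c := if ch = '1' then c + 1 else c
    c :: countsLoop rest c

-- second pass: keep ch where ch != '1' and i % 2 == cnt % 2
def keptLoop : List (Int × Char × Int) → List Char
  | [] => []
  | (i, ch, cnt) :: rest =>
    (if ch ≠ '1' ∧ PySem.Int.mod i 2 = PySem.Int.mod cnt 2 then [ch] else []) ++ keptLoop rest

def solution_alt (code : String) : String :=
  let kept := keptLoop (PySem.List.enumerate (code.toList.zip (countsLoop code.toList 0)) 0)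
  if String.ofList kept = "" then "EMPTY" else String.ofList kept

-- ===== PRECONDITION & SPEC =====
def Spec_solution (code : String) (out : String) : Prop := out = solution_alt code
instance (code : String) (out : String) : Decidable (Spec_solution code out) := by unfold Spec_solution; infer_instance

-- ===== CLAIM (what is proved, stated in full; the proofs are below) =====
def Claim_equal_solution : Prop := ∀ (code : String), Dom_solution code → Spec_solution code (solution code)

-- ===== LEMMAS AND PROOFS =====

theorem pvmod2 (a : Int) : PySem.Int.mod a 2 = a % 2 :=
  PySem.Int.mod_eq_emod_of_pos (by norm_num)

-- common characterisation: kept chars of the suffix, at absolute index i, with k '1's seen so far (inclusive update first)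
def select : List Char → Int → Int → List Char
  | [], _, _ => []
  | c :: t, i, k =>
    let k' := if c = '1' then k + 1 else k
    (if c ≠ '1' ∧ i % 2 = k' % 2 then [c] else []) ++ select t (i + 1) k'

theorem keptLoop_eq_select (l : List Char) (k s : Int) :
    keptLoop (PySem.List.enumerate (l.zip (countsLoop l k)) s) = select l s k := by
  induction l generalizing k s with
  | nil => simp [countsLoop, keptLoop, select]
  | cons c t ih =>
    simp only [countsLoop, List.zip_cons_cons, PySem.List.enumerate_cons, keptLoop, select, ih,
      pvmod2]

theorem solutionLoop_eq_select (code : String) :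
    ∀ (rest pre acc : List Char) (k : Int),
      code.toList = pre ++ rest →
      (solutionLoop code rest (k % 2, (pre.length : Int), acc)).2.2
        = acc ++ select rest (pre.length : Int) k := by
  intro rest
  induction rest with
  | nil => intro pre acc k hsplit; simp [solutionLoop, select]
  | cons c t ih =>
    intro pre acc k hsplit
    have hget : PySem.Str.pyGet? code ((pre.length : Int)) = some c := by
      rw [PySem.Str.pyGet?_natCast, hsplit]
      simp
    have hsplit' : code.toList = (pre ++ [c]) ++ t := by simpa using hsplit
    have hget2 : code.toList[pre.length]? = some c := by
      rw [hsplit]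
      simp
    have ihapp := ih (pre ++ [c]) ;
    simp only [List.length_append, List.length_cons, List.length_nil, Nat.cast_add,
      Nat.cast_one, Nat.cast_zero, zero_add] at ihapp
    by_cases hc : c = '1'
    · -- toggle branch: new mode = (k+1) % 2, nothing appended (c = '1')
      rcases Int.emod_two_eq k with hk2 | hk2
      · have hk2' : (k + 1) % 2 = 1 := by omega
        simp only [solutionLoop, hget, hc, pvmod2, select, hk2, if_pos rfl]
        have h := ihapp acc (k + 1) hsplit'
        rw [hk2'] at h
        simpa [hc] using h
      · have hk2' : (k + 1) % 2 = 0 := by omega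
        simp only [solutionLoop, hget, hc, pvmod2, select, hk2]
        have h := ihapp acc (k + 1) hsplit'
        rw [hk2'] at h
        simpa [hc] using h
    · -- no toggle: mode stays k % 2
      rcases Int.emod_two_eq k with hk2 | hk2 <;>
        rcases Int.emod_two_eq ((pre.length : Int)) with hi2 | hi2
      · have h := ihapp (acc ++ [c]) k hsplit'
        rw [hk2] at h
        simp [solutionLoop, hget, hget2, hc, pvmod2, select, hk2, hi2, h, List.append_assoc]
      · have h := ihapp acc k hsplit'
        rw [hk2] at h
        simp [solutionLoop, hget, hget2, hc, pvmod2, select, hk2, hi2, h]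
      · have h := ihapp acc k hsplit'
        rw [hk2] at h
        simp [solutionLoop, hget, hget2, hc, pvmod2, select, hk2, hi2, h]
      · have h := ihapp (acc ++ [c]) k hsplit'
        rw [hk2] at h
        simp [solutionLoop, hget, hget2, hc, pvmod2, select, hk2, hi2, h, List.append_assoc]

theorem ofList_eq_empty_iff (l : List Char) : String.ofList l = "" ↔ l = [] := by
  constructor
  · intro h
    have h2 := congrArg String.toList h
    simpa using h2
  · rintro rfl; rfl

-- ===== VERDICT (by name: the statement is the Claim_ definition above) =====
theorem solution_spec : Claim_equal_solution := by
  intro code _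
  unfold Spec_solution solution solution_alt
  have hA := solutionLoop_eq_select code code.toList [] [] 0 (by simp)
  norm_num at hA
  rw [hA, keptLoop_eq_select]
  rcases h : select code.toList 0 0 with _ | ⟨c, t⟩
  · simp
  · simp [ofList_eq_empty_iff]
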